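-- pv_equiv track=rewrite | github.com/Hyojeong721/TIL | make_sub_reop_file/SWA/0817/ready2start/5432_쇠막대기자르기/s2.py | count_stick
-- ===== SOURCE A (Python) =====
-- def count_stick(brackets):
--     """쇠막대기와 레이저의 배치를 나타내는 괄호 표현을 받아, 쇠막대기 조각의 개수를 구한다.
--
--     조건 1: 쇠막대기를 다른 쇠막대기 위에 놓는 경우 완전히 포함되도록 놓되, 끝점은 겹치지 않도록 놓는다.
--     조건 2: 각 쇠막대기를 자르는 레이저는 적어도 하나 존재한다.
--     조건 3: 레이저는 어떤 쇠막대기의 양 끝점과도 겹치지 않는다.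
--
--     Args:
--         brackets: 쇠막대기와 레이저의 배치를 나타내는 괄호 표현
--             - '()': 레이저
--             - '(': 쇠막대기의 시작
--             - ')': 쇠막대기의 끝
--     Returns:
--         count: 쇠막대기 조각의 개수
--     """
--     # open_bracket_index: 닫히지 않은 여는 괄호들의 인덱스
--     open_bracket_index = []
--     count = 0
--
--     # '()'를 '1'로 변환 ('1'의 위치: 레이저의 위치)
--     sticks_and_razors = brackets.replace('()', '1')
--
--     """
--     prefix_sum: sticks_and_razors 문자열의 i번째 인덱스까지의 '1'의 개수 누적 합 배열
--                 ( ex. "(11(1))" => [0, 1, 2, 2, 3, 3, 3] )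
--     """
--     prefix_sum = [0] * len(sticks_and_razors)
--     for idx, value in enumerate(sticks_and_razors):
--         if value == '1':
--             prefix_sum[idx] = 1
--
--     for i in range(1, len(sticks_and_razors)):
--         prefix_sum[i] += prefix_sum[i - 1]
--
--     for idx, value in enumerate(sticks_and_razors):
--         if value == '(':
--             open_bracket_index.append(idx)
--         elif value == ')':
--             # start_idx: 현재 닫는 괄호와 매칭되는 여는 괄호의 인덱스
--             start_idx = open_bracket_index.pop()
--
--             # sub_count: 현재 탐색 중인 쇠막대기의 조각의 개수
--             # 쇠막대기 조각의 개수 = 쇠막대기 인덱스 내의 '1'(레이저)의 개수 + 1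
--             sub_count = prefix_sum[idx] - prefix_sum[start_idx] + 1
--             count += sub_count
--
--     return count
-- ===== SOURCE B (Python) =====
-- def count_stick(brackets):
--     # Single pass: a running laser count, plus a stack holding the laser count
--     # seen when each still-open stick started.  A ')' right after '(' is a
--     # laser; any other ')' ends a stick, which yields one piece more than the
--     # number of lasers that hit it.
--     stack = []
--     lasers = 0
--     count = 0
--     for i, c in enumerate(brackets):
--         if c == '(':
--             stack.append(lasers)
--         elif c == ')':
--             if i > 0 and brackets[i - 1] == '(':
--                 stack.pop()
--                 lasers += 1
--             else:
--                 count += lasers - stack.pop() + 1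
--     return count
-- ===== Notes on version B (the rewrite author's own statement) =====
-- stated objective: simpler
-- what changed: B drops A's replace-based preprocessing, the prefix-sum array and the index stack, and instead makes one pass keeping a running laser count plus, per open stick, the laser count at its start; Pre_ excludes strings containing the character '1' (outside the bracket alphabet the function is specified for, A's internal replace marker collides with them and A counts literal '1's as lasers) and prefix-unbalanced strings, on which both programs raise IndexError.
-- outside the precondition, e.g. on count_stick('(1)'): A returns 2, B returns 1; on count_stick('1'): A returns 0, B returns 0; on count_stick(')'): A raises IndexError, B raises IndexError
import Mathlib
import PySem

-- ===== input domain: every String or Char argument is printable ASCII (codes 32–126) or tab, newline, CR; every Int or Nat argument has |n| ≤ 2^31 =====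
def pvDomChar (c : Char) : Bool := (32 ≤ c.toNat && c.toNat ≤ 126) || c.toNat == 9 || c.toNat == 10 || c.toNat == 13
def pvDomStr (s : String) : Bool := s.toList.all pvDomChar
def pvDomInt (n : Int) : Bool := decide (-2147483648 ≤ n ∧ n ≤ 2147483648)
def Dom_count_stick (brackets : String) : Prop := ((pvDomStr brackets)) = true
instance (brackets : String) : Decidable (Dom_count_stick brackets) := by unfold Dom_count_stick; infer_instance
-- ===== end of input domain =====

-- B replaces A's replace()/prefix-sum/index-stack pipeline by a single pass that keeps a running
-- laser count and, per open stick, the laser count at its start (objective: simpler).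


-- ===== PORT A =====
-- in-place prefix-sum loop `prefix_sum[i] += prefix_sum[i-1]`
def pvAccum (acc : Int) : List Int → List Int
  | [] => []
  | x :: t => (acc + x) :: pvAccum (acc + x) t

-- body of A's third loop (state: open_bracket_index stack of indices, count)
def pvStepA (ps : List Int) (st : List Int × Int) (p : Int × Char) : List Int × Int :=
  if p.2 = '(' then (p.1 :: st.1, st.2)
  else if p.2 = ')' then
    match st.1 with
    | [] => st  -- Python raises IndexError here; excluded by Pre_
    | s :: rest => (rest, st.2 + (ps.getD p.1.toNat 0 - ps.getD s.toNat 0 + 1))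
  else st

def count_stick (brackets : String) : Int :=
  let sr := (PySem.Str.replace brackets "()" "1").toList
  let marks := sr.map (fun c => if c = '1' then (1 : Int) else 0)
  let ps := pvAccum 0 marks
  ((PySem.List.enumerate sr 0).foldl (pvStepA ps) ([], 0)).2

-- ===== PORT B =====
-- body of B's single loop (state: stack of laser counts at stick starts, lasers, count)
def pvStepB (l : List Char) (st : List Int × Int × Int) (p : Int × Char) : List Int × Int × Int :=
  if p.2 = '(' then (st.2.1 :: st.1, st.2.1, st.2.2)
  else if p.2 = ')' then
    if 0 < p.1 ∧ l.getD (p.1 - 1).toNat ' ' = '(' then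
      match st.1 with
      | [] => st  -- unreachable: the '(' just before was pushed
      | _ :: rest => (rest, st.2.1 + 1, st.2.2)
    else
      match st.1 with
      | [] => st  -- Python raises IndexError here; excluded by Pre_
      | x :: rest => (rest, st.2.1, st.2.2 + (st.2.1 - x + 1))
  else st

def count_stick_alt (brackets : String) : Int :=
  ((PySem.List.enumerate brackets.toList 0).foldl (pvStepB brackets.toList) ([], 0, 0)).2.2

-- ===== PRECONDITION & SPEC =====
-- Pre_ excludes (a) strings containing the character '1' — outside the bracket alphabet the
-- function is specified for, A's internal replace('()','1') marker collides with the input and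
-- A counts literal '1's as lasers — and (b) prefix-unbalanced strings, where some ')' closes
-- with no stick open, on which both A and B raise IndexError at their .pop().
def Pre_count_stick (brackets : String) : Prop :=
  '1' ∉ brackets.toList ∧
  ∀ n ∈ List.range (brackets.toList.length + 1),
    (brackets.toList.take n).count ')' ≤ (brackets.toList.take n).count '('
instance (brackets : String) : Decidable (Pre_count_stick brackets) := by
  unfold Pre_count_stick; infer_instance

def pvWitness_count_stick : String := "(())()"

def Spec_count_stick (brackets : String) (out : Int) : Prop := out = count_stick_alt brackets
instance (brackets : String) (out : Int) : Decidable (Spec_count_stick brackets out) := by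
  unfold Spec_count_stick; infer_instance

-- ===== CLAIM (what is proved, stated in full; the proofs are below) =====
def Claim_equal_count_stick : Prop := ∀ (brackets : String), Dom_count_stick brackets →
  Pre_count_stick brackets → Spec_count_stick brackets (count_stick brackets)

-- ===== LEMMAS AND PROOFS =====

-- structural form of brackets.replace('()', '1')
def pvRepl : List Char → List Char
  | [] => []
  | [c] => [c]
  | c :: d :: t =>
    if c = '(' ∧ d = ')' then '1' :: pvRepl t else c :: pvRepl (d :: t)
termination_by l => l.length

-- common reference loop: suffix, stack of laser counts, lasers so far, count
def pvRec : List Char → List Int → Int → Int → Int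
  | [], _, _, c => c
  | ch :: t, st, L, c =>
    if ch = '(' then pvRec t (L :: st) L c
    else if ch = ')' then
      match st with
      | [] => pvRec t [] L c
      | x :: rest => pvRec t rest L (c + (L - x + 1))
    else if ch = '1' then pvRec t st (L + 1) c
    else pvRec t st L c

theorem pvRepl_go_eq (fuel : Nat) : ∀ (l acc : List Char), l.length ≤ fuel →
    PySem.Chars.replace.go "()".toList "1".toList fuel l acc = acc.reverse ++ pvRepl l := by
  induction fuel with
  | zero =>
    intro l acc h
    have : l = [] := List.eq_nil_of_length_eq_zero (Nat.le_zero.mp h)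
    subst this
    simp [PySem.Chars.replace.go, pvRepl]
  | succ fuel ih =>
    intro l acc h
    cases l with
    | nil => simp [PySem.Chars.replace.go, pvRepl]
    | cons c t =>
      rw [PySem.Chars.replace.go]
      have htl : "()".toList = ['(', ')'] := rfl
      by_cases hp : ("()".toList).isPrefixOf (c :: t) = true
      · obtain ⟨hc, t', ht⟩ : c = '(' ∧ ∃ t', t = ')' :: t' := by
          rw [htl] at hp
          cases t with
          | nil => simp [List.isPrefixOf] at hp
          | cons d t' =>
            simp [List.isPrefixOf] at hp
            exact ⟨hp.1.symm, t', by rw [hp.2]⟩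
        subst hc; subst ht
        simp only [hp, if_pos]
        have hdrop : List.drop "()".toList.length ('(' :: ')' :: t') = t' := rfl
        rw [hdrop, ih t' ("1".toList.reverse ++ acc) (by simp at h; omega)]
        simp [pvRepl]
      · simp only [hp]
        cases t with
        | nil =>
          have : fuel = 0 ∨ 0 < fuel := by omega
          rcases Nat.eq_zero_or_pos fuel with h0 | h0
          · subst h0; simp [PySem.Chars.replace.go, pvRepl]
          · obtain ⟨f', rfl⟩ := Nat.exists_eq_succ_of_ne_zero (Nat.pos_iff_ne_zero.mp h0)
            simp [PySem.Chars.replace.go, pvRepl]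
        | cons d t' =>
          rw [ih (d :: t') (c :: acc) (by simp at h ⊢; omega)]
          have hnot : ¬(c = '(' ∧ d = ')') := by
            intro ⟨h1, h2⟩; subst h1; subst h2
            simp [htl, List.isPrefixOf] at hp
          simp [pvRepl, hnot]

theorem pvReplace_eq (s : String) :
    (PySem.Str.replace s "()" "1").toList = pvRepl s.toList := by
  rw [PySem.Str.toList_replace]
  rw [PySem.Chars.replace]
  simp only [List.isEmpty_iff]
  rw [if_neg (by decide)]
  simpa using pvRepl_go_eq s.toList.length s.toList [] le_rfl

theorem pvAccum_getD : ∀ (l : List Int) (a : Int) (i : Nat), i < l.length →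
    (pvAccum a l).getD i 0 = a + (l.take (i + 1)).sum := by
  intro l
  induction l with
  | nil => intro a i h; simp at h
  | cons x t ih =>
    intro a i h
    cases i with
    | zero => simp [pvAccum]
    | succ i =>
      simp only [pvAccum, List.getD_cons_succ, List.take_succ_cons, List.sum_cons]
      rw [ih (a + x) i (by simpa using h)]
      ring

theorem pvMarks_sum : ∀ (l : List Char),
    (l.map (fun c => if c = '1' then (1 : Int) else 0)).sum = (l.count '1' : Int) := by
  intro l
  induction l with
  | nil => simp
  | cons x t ih =>
    simp only [List.map_cons, List.sum_cons, List.count_cons, ih]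
    by_cases hx : x = '1' <;> simp [hx]
    ring

theorem pvPs_getD (r : List Char) (i : Nat) (h : i < r.length) :
    (pvAccum 0 (r.map (fun c => if c = '1' then (1 : Int) else 0))).getD i 0
      = ((r.take (i + 1)).count '1' : Int) := by
  rw [pvAccum_getD _ 0 i (by simpa using h)]
  rw [← List.map_take, pvMarks_sum]
  simp

theorem pvDrop_head (r : List Char) (k : Nat) (x : Char) (u' : List Char)
    (h : x :: u' = r.drop k) : k < r.length ∧ r[k]? = some x ∧ u' = r.drop (k + 1) := by
  have hk : k < r.length := by
    by_contra hk
    push_neg at hk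
    rw [List.drop_eq_nil_of_le hk] at h
    exact absurd h (by simp)
  refine ⟨hk, ?_, ?_⟩
  · have h0 : (r.drop k)[0]? = r[k + 0]? := by rw [List.getElem?_drop]
    rw [← h] at h0
    simpa using h0.symm
  · have h1 : List.drop 1 (List.drop k r) = List.drop (k + 1) r := by rw [List.drop_drop]
    rw [← h] at h1
    exact (by simpa using h1)

theorem pvCount_take_succ (r : List Char) (k : Nat) (x : Char) (hx : r[k]? = some x) (c : Char) :
    (r.take (k + 1)).count c = (r.take k).count c + (if x = c then 1 else 0) := by
  rw [List.take_succ, hx]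
  rw [List.count_append]
  by_cases hxc : x = c
  · subst hxc; simp [List.count_cons]
  · simp [List.count_cons, hxc, Ne.symm hxc]

theorem pvAfold (r : List Char) : ∀ (u : List Char) (k : Nat), u = r.drop k →
    ∀ (stI : List Int) (c : Int),
    ((PySem.List.enumerate u (k : Int)).foldl
        (pvStepA (pvAccum 0 (r.map (fun c => if c = '1' then (1 : Int) else 0)))) (stI, c)).2
      = pvRec u (stI.map (fun ix =>
          (pvAccum 0 (r.map (fun c => if c = '1' then (1 : Int) else 0))).getD ix.toNat 0))
          ((r.take k).count '1' : Int) c := by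
  intro u
  induction u with
  | nil => intro k _ stI c; simp [PySem.List.enumerate, pvRec]
  | cons x u' ih =>
    intro k hu stI c
    obtain ⟨hk, hget, hu'⟩ := pvDrop_head r k x u' hu
    have hcast : ((k : Int) + 1) = ((k + 1 : Nat) : Int) := by push_cast; ring
    rw [PySem.List.enumerate_cons, List.foldl_cons, hcast]
    have hcnt := pvCount_take_succ r k x hget '1'
    by_cases hx1 : x = '('
    · subst hx1
      rw [show pvStepA (pvAccum 0 (r.map (fun c => if c = '1' then (1 : Int) else 0))) (stI, c)
            ((k : Int), '(') = ((k : Int) :: stI, c) from rfl]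
      rw [ih (k + 1) hu' ((k : Int) :: stI) c]
      simp only [pvRec, if_pos rfl, List.map_cons, Int.toNat_natCast, if_true]
      rw [pvPs_getD r k hk, hcnt]
      simp
    · by_cases hx2 : x = ')'
      · subst hx2
        cases stI with
        | nil =>
          rw [show pvStepA (pvAccum 0 (r.map (fun c => if c = '1' then (1 : Int) else 0)))
                (([] : List Int), c) ((k : Int), ')') = ([], c) from rfl]
          rw [ih (k + 1) hu' [] c]
          rw [List.map_nil]
          rw [show pvRec (')' :: u') ([] : List Int)
                ((List.count '1' (List.take k r) : Int)) c
              = pvRec u' [] ((List.count '1' (List.take k r) : Int)) c from rfl]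
          rw [hcnt]
          norm_num
        | cons ix rest =>
          rw [show pvStepA (pvAccum 0 (r.map (fun c => if c = '1' then (1 : Int) else 0)))
                ((ix :: rest), c) ((k : Int), ')')
              = (rest, c + ((pvAccum 0 (r.map (fun c => if c = '1' then (1 : Int) else 0))).getD
                  ((k : Int)).toNat 0
                - (pvAccum 0 (r.map (fun c => if c = '1' then (1 : Int) else 0))).getD ix.toNat 0
                + 1)) from rfl]
          rw [ih (k + 1) hu' rest _]
          rw [List.map_cons]
          rw [show ∀ (y : Int) (rest' : List Int),
                pvRec (')' :: u') (y :: rest') ((List.count '1' (List.take k r) : Int)) c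
              = pvRec u' rest' ((List.count '1' (List.take k r) : Int))
                  (c + ((List.count '1' (List.take k r) : Int) - y + 1)) from fun _ _ => rfl]
          rw [Int.toNat_natCast, pvPs_getD r k hk, hcnt]
          norm_num
      · have hstep : pvStepA (pvAccum 0 (r.map (fun c => if c = '1' then (1 : Int) else 0)))
            (stI, c) ((k : Int), x) = (stI, c) := by
          simp [pvStepA, hx1, hx2]
        rw [hstep, ih (k + 1) hu' stI c]
        by_cases hx3 : x = '1'
        · subst hx3
          simp only [pvRec, if_neg hx1, if_neg hx2, if_pos rfl]
          rw [hcnt]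
          push_cast
          ring_nf
        · simp only [pvRec, if_neg hx1, if_neg hx2, if_neg hx3]
          rw [hcnt]
          simp [hx3]

theorem pvBfold (s : List Char) (hone : '1' ∉ s) :
    ∀ (n : Nat) (u : List Char) (k : Nat), u.length ≤ n →
    u = s.drop k →
    (∀ u', u = ')' :: u' → ¬(0 < k ∧ s.getD (k - 1) ' ' = '(')) →
    ∀ (st : List Int) (L c : Int),
    ((PySem.List.enumerate u (k : Int)).foldl (pvStepB s) (st, L, c)).2.2
      = pvRec (pvRepl u) st L c := by
  intro n
  induction n with
  | zero =>
    intro u k hn hu _ st L c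
    have : u = [] := List.eq_nil_of_length_eq_zero (Nat.le_zero.mp hn)
    subst this
    simp [PySem.List.enumerate, pvRepl, pvRec]
  | succ n ih =>
    intro u k hn hu hprev st L c
    cases u with
    | nil => simp [PySem.List.enumerate, pvRepl, pvRec]
    | cons x u' =>
      obtain ⟨hk, hget, hu'⟩ := pvDrop_head s k x u' hu
      have hgetD : s.getD k ' ' = x := by
        rw [List.getD_eq_getElem?_getD, hget]; rfl
      have hxmem : x ∈ s := by
        have : x ∈ s.drop k := by rw [← hu]; exact List.mem_cons_self ..
        exact List.mem_of_mem_drop this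
      have hcast : ((k : Int) + 1) = ((k + 1 : Nat) : Int) := by push_cast; ring
      by_cases hx1 : x = '('
      · subst hx1
        cases u' with
        | cons y u'' =>
          by_cases hy : y = ')'
          · -- a '()' laser pair: two fold steps
            subst hy
            obtain ⟨hk2, hget2, hu''⟩ := pvDrop_head s (k + 1) ')' u'' hu'
            have hgetD2 : s.getD (k + 1) ' ' = ')' := by
              rw [List.getD_eq_getElem?_getD, hget2]; rfl
            rw [PySem.List.enumerate_cons, List.foldl_cons, hcast,
                PySem.List.enumerate_cons, List.foldl_cons]
            rw [show pvStepB s (st, L, c) ((k : Int), '(') = (L :: st, L, c) from rfl]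
            have hstep2 : pvStepB s (L :: st, L, c) (((k + 1 : Nat) : Int), ')')
                = (st, L + 1, c) := by
              have hguard : (0 : Int) < ((k + 1 : Nat) : Int) ∧
                  s.getD (((k + 1 : Nat) : Int) - 1).toNat ' ' = '(' := by
                constructor
                · push_cast; omega
                · rw [show (((k + 1 : Nat) : Int) - 1).toNat = k by omega]
                  exact hgetD
              simp [pvStepB, List.getD_eq_getElem?_getD, hget]
            rw [hstep2]
            have hcast2 : (((k + 1 : Nat) : Int) + 1) = ((k + 2 : Nat) : Int) := by
              push_cast; ring
            rw [hcast2]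
            rw [ih u'' (k + 2) (by simp at hn ⊢; omega) (by rw [hu''])
                (by intro v hv hc
                    have h2 : s.getD (k + 2 - 1) ' ' = ')' := hgetD2
                    exact absurd (hc.2.symm.trans h2) (by decide))
                st (L + 1) c]
            rw [show pvRepl ('(' :: ')' :: u'') = '1' :: pvRepl u'' by simp [pvRepl]]
            rfl
          · -- '(' not followed by ')': plain stick start
            rw [PySem.List.enumerate_cons, List.foldl_cons, hcast]
            rw [show pvStepB s (st, L, c) ((k : Int), '(') = (L :: st, L, c) from rfl]
            rw [ih (y :: u'') (k + 1) (by simp at hn ⊢; omega) hu'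
                (by intro v hv; simp at hv; exact absurd hv.1 hy)
                (L :: st) L c]
            rw [show pvRepl ('(' :: y :: u'') = '(' :: pvRepl (y :: u'') by
              simp only [pvRepl]; rw [if_neg (fun h => hy h.2)]]
            rfl
        | nil =>
          rw [PySem.List.enumerate_cons, List.foldl_cons, hcast]
          rw [show pvStepB s (st, L, c) ((k : Int), '(') = (L :: st, L, c) from rfl]
          rw [show pvRepl ['('] = ['('] by simp [pvRepl]]
          rfl
      · by_cases hx2 : x = ')'
        · -- a stick end (prev char is not '(')
          subst hx2
          have hng : ¬((0 : Int) < (k : Int) ∧ s.getD ((k : Int) - 1).toNat ' ' = '(') := by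
            intro ⟨h1, h2⟩
            have hk0 : 0 < k := by exact_mod_cast h1
            refine hprev u' rfl ⟨hk0, ?_⟩
            rw [show ((k : Int) - 1).toNat = k - 1 by omega] at h2
            exact h2
          rw [PySem.List.enumerate_cons, List.foldl_cons, hcast]
          have hprev' : ∀ v, u' = ')' :: v → ¬(0 < k + 1 ∧ s.getD (k + 1 - 1) ' ' = '(') := by
            intro v hv hc
            rw [show k + 1 - 1 = k from rfl, hgetD] at hc
            exact absurd hc.2 (by decide)
          cases st with
          | nil =>
            rw [show pvStepB s (([] : List Int), L, c) ((k : Int), ')')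
                = ([], L, c) by simp [pvStepB]]
            rw [ih u' (k + 1) (by simp at hn ⊢; omega) hu' hprev' [] L c]
            rw [show pvRepl (')' :: u') = ')' :: pvRepl u' by
              cases u' <;> simp [pvRepl]]
            rfl
          | cons t rest =>
            rw [show pvStepB s ((t :: rest), L, c) ((k : Int), ')')
                = (rest, L, c + (L - t + 1)) by
                  simp [pvStepB]
                  intro h0 hc
                  exact absurd ⟨h0, by rw [List.getD_eq_getElem?_getD]; exact hc⟩
                    (hprev u' rfl)]
            rw [ih u' (k + 1) (by simp at hn ⊢; omega) hu' hprev' rest L (c + (L - t + 1))]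
            rw [show pvRepl (')' :: u') = ')' :: pvRepl u' by
              cases u' <;> simp [pvRepl]]
            rfl
        · -- any other character (never '1' by Pre_): a no-op for B and for pvRec on pvRepl
          have hx3 : x ≠ '1' := fun h => hone (h ▸ hxmem)
          rw [PySem.List.enumerate_cons, List.foldl_cons, hcast]
          have hprev' : ∀ v, u' = ')' :: v → ¬(0 < k + 1 ∧ s.getD (k + 1 - 1) ' ' = '(') := by
            intro v hv hc
            rw [show k + 1 - 1 = k from rfl, hgetD] at hc
            exact absurd hc.2 hx1
          have hrepl : pvRepl (x :: u') = x :: pvRepl u' := by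
            cases u' with
            | nil => simp [pvRepl]
            | cons d t =>
              simp only [pvRepl]
              rw [if_neg (fun h => hx1 h.1)]
          rw [show pvStepB s (st, L, c) ((k : Int), x)
              = (st, L, c) by simp [pvStepB, hx1, hx2]]
          rw [ih u' (k + 1) (by simp at hn ⊢; omega) hu' hprev' st L c]
          rw [hrepl]
          simp [pvRec, hx1, hx2, hx3]

-- ===== VERDICT (by name: the statement is the Claim_ definition above) =====
theorem count_stick_spec : Claim_equal_count_stick := by
  intro brackets _ hpre
  unfold Spec_count_stick count_stick count_stick_alt
  dsimp only
  rw [pvReplace_eq]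
  have hA := pvAfold (pvRepl brackets.toList) (pvRepl brackets.toList) 0 rfl [] 0
  have hB := pvBfold brackets.toList hpre.1 brackets.toList.length brackets.toList 0 le_rfl rfl
      (fun _ _ h => absurd h.1 (lt_irrefl 0)) [] 0 0
  simp only [Nat.cast_zero] at hA hB
  rw [hA, hB]
  simp
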